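-- pv_equiv track=rewrite | github.com/ericjardon/python-coding-problems | UNSTRUCTURED/CP-Python/carvans.py | carsAtMax
-- ===== SOURCE A (Python) =====
-- def carsAtMax(speeds):
--     speeds = [int(i) for i in speeds]
--     cars = len(speeds)
--     for i in range(1,len(speeds)):
--         if speeds[i] > speeds[i-1]:
--             # if the car's max speed is larger than the speed of the one before it
--             cars -= 1   # there is one less car who is at max speed
--             speeds[i] = speeds[i-1] # the car lowers to match the speed of the car in front
--     return cars
-- ===== SOURCE B (Python) =====
-- def carsAtMax(speeds):
--     xs = [int(i) for i in speeds]
--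
--     def solve(a):
--         # list of the speeds actually driven, i.e. the left-to-right minima of a
--         if len(a) <= 1:
--             return a
--         mid = len(a) // 2
--         ml = solve(a[:mid])
--         mr = solve(a[mid:])
--         b = ml[-1]
--         return ml + [v for v in mr if v <= b]
--
--     return len(solve(xs))
-- ===== Notes on version B (the rewrite author's own statement) =====
-- stated objective: alternative
-- what changed: Replaces A's single indexed pass with in-place mutation and a count-down from the total by a divide-and-conquer recursion: compute the left-to-right minima list of each half and merge by keeping the right half's minima that do not exceed the left half's last minimum, returning the merged list's length.
import Mathlib
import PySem

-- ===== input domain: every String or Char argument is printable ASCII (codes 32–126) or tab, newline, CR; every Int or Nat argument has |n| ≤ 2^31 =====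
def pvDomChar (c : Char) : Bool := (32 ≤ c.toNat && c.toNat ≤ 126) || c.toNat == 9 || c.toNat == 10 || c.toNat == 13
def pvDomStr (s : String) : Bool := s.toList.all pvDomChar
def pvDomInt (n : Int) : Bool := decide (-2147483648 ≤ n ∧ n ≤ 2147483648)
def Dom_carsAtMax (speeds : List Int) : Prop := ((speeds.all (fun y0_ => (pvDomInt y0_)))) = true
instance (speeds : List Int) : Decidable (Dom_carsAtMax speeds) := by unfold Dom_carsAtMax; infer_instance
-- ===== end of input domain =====

-- B replaces A's indexed loop with in-place mutation and a count-down from the total by a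
-- divide-and-conquer recursion on halves that builds the list of left-to-right minima
-- (the speeds actually driven) and returns its length (alternative algorithm).

-- ===== PORT A =====
-- for i in range(1, len(speeds)): if speeds[i] > speeds[i-1]: cars -= 1; speeds[i] = speeds[i-1]
-- (indices i and i-1 are always in range, so the total pyGetD/pySetD forms are exact here)
def carsAtMax (speeds : List Int) : Int :=
  let st := (PySem.List.pyRange 1 (speeds.length : Int) 1).foldl
    (fun (st : Int × List Int) i =>
      if PySem.List.pyGetD st.2 i 0 > PySem.List.pyGetD st.2 (i - 1) 0 then
        (st.1 - 1, PySem.List.pySetD st.2 i (PySem.List.pyGetD st.2 (i - 1) 0))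
      else st)
    ((speeds.length : Int), speeds)
  st.1

-- ===== PORT B =====
-- def solve(a): if len(a) <= 1: return a; mid = len(a)//2; ml = solve(a[:mid]); mr = solve(a[mid:]);
--               b = ml[-1]; return ml + [v for v in mr if v <= b]
-- (ml is nonempty whenever ml[-1] is read, since mid >= 1; getLastD 0 is exact there)
def pvSolveB (a : List Int) : List Int :=
  if a.length ≤ 1 then a
  else
    let mid := a.length / 2
    let ml := pvSolveB (a.take mid)
    let mr := pvSolveB (a.drop mid)
    let b := ml.getLastD 0
    ml ++ mr.filter (fun v => decide (v ≤ b))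
termination_by a.length
decreasing_by
  · simp only [List.length_take]; omega
  · simp only [List.length_drop]; omega

def carsAtMax_alt (speeds : List Int) : Int :=
  ((pvSolveB speeds).length : Int)

-- ===== PRECONDITION & SPEC =====
def Spec_carsAtMax (speeds : List Int) (out : Int) : Prop := out = carsAtMax_alt speeds
instance (speeds : List Int) (out : Int) : Decidable (Spec_carsAtMax speeds out) := by unfold Spec_carsAtMax; infer_instance

-- ===== CLAIM (what is proved, stated in full; the proofs are below) =====
def Claim_equal_carsAtMax : Prop := ∀ (speeds : List Int), Dom_carsAtMax speeds → Spec_carsAtMax speeds (carsAtMax speeds)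

-- ===== LEMMAS AND PROOFS =====

-- common reference function: number of elements of `rest` that are ≤ the running minimum (seeded with m)
def pvCnt (m : Int) : List Int → Int
  | [] => 0
  | s :: rest => (if s ≤ m then 1 else 0) + pvCnt (min m s) rest

-- reference: left-to-right minima of the list, given the minimum m seen so far
def pvMins (m : Int) : List Int → List Int
  | [] => []
  | s :: r => if s ≤ m then s :: pvMins s r else pvMins m r

-- reference: left-to-right minima of a whole list
def pvM : List Int → List Int
  | [] => []
  | x :: r => x :: pvMins x r

theorem pvMins_length (r : List Int) : ∀ m, ((pvMins m r).length : Int) = pvCnt m r := by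
  induction r with
  | nil => intro m; simp [pvMins, pvCnt]
  | cons s r ih =>
    intro m
    by_cases h : s ≤ m
    · have hmin : min m s = s := min_eq_right h
      simp [pvMins, pvCnt, h, hmin, ih s]
      ring
    · have hmin : min m s = m := min_eq_left (by omega)
      simp [pvMins, pvCnt, h, hmin, ih m]

-- the minima below a looser bound b are exactly the minima of the whole list that are ≤ b
theorem pvMins_filter (r : List Int) : ∀ b, pvMins b r = (pvM r).filter (fun y => decide (y ≤ b)) := by
  induction r with
  | nil => intro b; simp [pvMins, pvM]
  | cons x r ih =>
    intro b
    by_cases hx : x ≤ b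
    · simp only [pvMins, pvM, if_pos hx, List.filter_cons, decide_eq_true hx, if_pos]
      congr 1
      rw [ih x, List.filter_filter]
      apply List.filter_congr
      intro y _
      by_cases hy : y ≤ x
      · have hb : y ≤ b := le_trans hy hx
        simp [hy, hb]
      · simp [hy]
    · simp only [pvMins, pvM, if_neg hx, List.filter_cons, decide_eq_false hx,
        Bool.false_eq_true, if_false]
      rw [ih b, ih x, List.filter_filter]
      apply List.filter_congr
      intro y _
      by_cases hy : y ≤ b
      · simp [hy]; omega
      · simp [hy]
  -- (filter_congr gives pointwise equality on members)

theorem pvMins_append (r R : List Int) :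
    ∀ m, pvMins m (r ++ R) = pvMins m r ++ pvMins ((pvMins m r).getLastD m) R := by
  induction r with
  | nil => intro m; simp [pvMins]
  | cons s r ih =>
    intro m
    by_cases h : s ≤ m
    · simp only [List.cons_append, pvMins, if_pos h, List.getLastD_cons, ih s]
    · simp only [List.cons_append, pvMins, if_neg h, ih m]

-- merging the minima of the two halves: the key divide-and-conquer identity
theorem pvM_append (L R : List Int) (h : L ≠ []) :
    pvM (L ++ R) = pvM L ++ (pvM R).filter (fun y => decide (y ≤ (pvM L).getLastD 0)) := by
  cases L with
  | nil => exact absurd rfl h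
  | cons x r =>
    have h1 : pvM (x :: r) = x :: pvMins x r := rfl
    rw [h1, List.getLastD_cons, List.cons_append]
    show x :: pvMins x (r ++ R) = x :: pvMins x r ++ _
    rw [pvMins_append r R x, pvMins_filter R]
    rfl

theorem pvSolveB_eq (a : List Int) : pvSolveB a = pvM a := by
  induction a using pvSolveB.induct with
  | case1 a h =>
    rw [pvSolveB, if_pos h]
    match a, h with
    | [], _ => rfl
    | [x], _ => simp [pvM, pvMins]
  | case2 a h n1 n2 n3 =>
    rw [pvSolveB, if_neg h]
    simp only
    rw [n2, n3]
    have hL : a.take n1 ≠ [] := by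
      have hlen : (a.take n1).length = n1 := by simp [n1]; omega
      intro hnil
      rw [hnil] at hlen
      simp [n1] at hlen
      omega
    rw [← pvM_append _ _ hL, List.take_append_drop]

theorem carsAtMax_alt_cons (s : Int) (tail : List Int) :
    carsAtMax_alt (s :: tail) = 1 + pvCnt s tail := by
  rw [carsAtMax_alt, pvSolveB_eq]
  simp only [pvM, List.length_cons]
  rw [← pvMins_length tail s]
  push_cast
  ring

-- getD of an append at the last index of the left part is that part's last element
theorem pvGetD_append_last {pm : List Int} (h : pm ≠ []) (ys : List Int) (d : Int) :
    (pm ++ ys).getD (pm.length - 1) d = pm.getLast h := by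
  have hl : 0 < pm.length := List.length_pos_iff.mpr h
  rw [List.getD_eq_getElem?_getD, List.getElem?_append_left (by omega),
    List.getLast_eq_getElem]
  simp [List.getElem?_eq_getElem (by omega : pm.length - 1 < pm.length)]

-- A's loop invariant: processed prefix pm (nonempty, its last entry is the running minimum),
-- remaining suffix rest; the counter ends at cars - |rest| + (number of rest-elements ≤ running min)
theorem pvFoldA (rest : List Int) (pm : List Int) (cars : Int) (h : pm ≠ []) :
    ((PySem.List.pyRange (pm.length : Int) ((pm.length : Int) + (rest.length : Int)) 1).foldl
      (fun (st : Int × List Int) i =>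
        if PySem.List.pyGetD st.2 i 0 > PySem.List.pyGetD st.2 (i - 1) 0 then
          (st.1 - 1, PySem.List.pySetD st.2 i (PySem.List.pyGetD st.2 (i - 1) 0))
        else st)
      (cars, pm ++ rest)).1 = cars - rest.length + pvCnt (pm.getLast h) rest := by
  induction rest generalizing pm cars with
  | nil =>
    rw [PySem.List.pyRange_one_eq_nil (by simp)]
    simp [pvCnt]
  | cons s rest ih =>
    rw [PySem.List.pyRange_one_cons (by simp only [List.length_cons]; push_cast; omega)]
    simp only [List.foldl_cons]
    have hl : 0 < pm.length := List.length_pos_iff.mpr h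
    have hget_i : PySem.List.pyGetD (pm ++ s :: rest) (pm.length : Int) 0 = s := by
      rw [PySem.List.pyGetD_natCast, List.getD_eq_getElem?_getD,
        List.getElem?_append_right (le_refl _)]
      simp
    have hsub : ((pm.length : Int) - 1) = ((pm.length - 1 : Nat) : Int) := by omega
    have hget_prev : PySem.List.pyGetD (pm ++ s :: rest) ((pm.length : Int) - 1) 0
        = pm.getLast h := by
      rw [hsub, PySem.List.pyGetD_natCast, pvGetD_append_last h]
    rw [hget_i, hget_prev]
    by_cases hc : s > pm.getLast h
    · rw [if_pos hc]
      have hset : PySem.List.pySetD (pm ++ s :: rest) (pm.length : Int) (pm.getLast h)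
          = (pm ++ [pm.getLast h]) ++ rest := by
        rw [PySem.List.pySetD_natCast]
        simp
      rw [hset]
      have h2 : pm ++ [pm.getLast h] ≠ [] := by simp
      have hIH := ih (pm ++ [pm.getLast h]) (cars - 1) h2
      rw [show (pm ++ [pm.getLast h]).getLast h2 = pm.getLast h by simp] at hIH
      rw [show ((pm ++ [pm.getLast h]).length : Int) = (pm.length : Int) + 1 by
        simp only [List.length_append, List.length_singleton]; push_cast; ring] at hIH
      rw [show (pm.length : Int) + (((s :: rest).length : Nat) : Int)
          = ((pm.length : Int) + 1) + (rest.length : Int) by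
        simp only [List.length_cons]; push_cast; ring]
      rw [hIH]
      have hmin : min (pm.getLast h) s = pm.getLast h := by omega
      simp only [pvCnt, hmin, List.length_cons]
      split_ifs with h3
      · omega
      · push_cast; omega
    · rw [if_neg hc]
      have hrw : pm ++ s :: rest = (pm ++ [s]) ++ rest := by simp
      rw [hrw]
      have h2 : pm ++ [s] ≠ [] := by simp
      have hIH := ih (pm ++ [s]) cars h2
      rw [show (pm ++ [s]).getLast h2 = s by simp] at hIH
      rw [show ((pm ++ [s]).length : Int) = (pm.length : Int) + 1 by
        simp only [List.length_append, List.length_singleton]; push_cast; ring] at hIH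
      rw [show (pm.length : Int) + (((s :: rest).length : Nat) : Int)
          = ((pm.length : Int) + 1) + (rest.length : Int) by
        simp only [List.length_cons]; push_cast; ring]
      rw [hIH]
      have hmin : min (pm.getLast h) s = s := by omega
      simp only [pvCnt, hmin, List.length_cons]
      split_ifs with h3
      · push_cast; omega
      · omega

-- ===== VERDICT (by name: the statement is the Claim_ definition above) =====
theorem carsAtMax_spec : Claim_equal_carsAtMax := by
  intro speeds _
  unfold Spec_carsAtMax
  cases speeds with
  | nil => simp [carsAtMax, carsAtMax_alt, pvSolveB, PySem.List.pyRange_one_eq_nil]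
  | cons s tail =>
    rw [carsAtMax_alt_cons]
    unfold carsAtMax
    have h1 : ([s] : List Int) ≠ [] := by simp
    have hA := pvFoldA tail [s] ((s :: tail).length : Int) h1
    rw [show (([s] : List Int).length : Int) = 1 by simp] at hA
    rw [show ([s].getLast h1 : Int) = s by simp] at hA
    rw [show (([s] ++ tail : List Int)) = s :: tail from rfl] at hA
    rw [show ((s :: tail).length : Int) = 1 + (tail.length : Int) by
      simp only [List.length_cons]; push_cast; ring]
    rw [show ((s :: tail).length : Int) = 1 + (tail.length : Int) by
      simp only [List.length_cons]; push_cast; ring] at hA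
    rw [hA]
    omega
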